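-- pv_equiv track=rewrite | github.com/akhmerov/python-mumps | util/update_mumps_descriptions.py | inject_license
-- ===== SOURCE A (Python) =====
-- def inject_license(enums_src: str, license_text: str) -> str:
--     begin = "# MUMPS LICENSE"
--     end = "# END MUMPS LICENSE"
--     if begin not in enums_src or end not in enums_src:
--         return enums_src  # be conservative
--     pre, rest = enums_src.split(begin, 1)
--     _, post = rest.split(end, 1)
--     commented = "\n".join(
--         [begin, *[f"# {ln}".rstrip() for ln in license_text.splitlines()], "", end]
--     )
--     return pre + commented + post
-- ===== SOURCE B (Python) =====
-- def inject_license(enums_src: str, license_text: str) -> str: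
--     begin = "# MUMPS LICENSE"
--     end = "# END MUMPS LICENSE"
--     n = len(enums_src)
--     kept = []
--     i = 0
--     # single left-to-right scan: copy characters until the begin marker starts here
--     while i < n and not enums_src.startswith(begin, i):
--         kept.append(enums_src[i])
--         i += 1
--     if i == n:
--         return enums_src  # no begin marker: be conservative
--     j = i + len(begin)
--     # keep scanning (discarding) until the end marker starts here
--     while j < n and not enums_src.startswith(end, j):
--         j += 1
--     if j == n:
--         return enums_src  # no end marker after the begin marker: be conservative
--     block = begin
--     for ln in license_text.splitlines():
--         block += "\n" + ("# " + ln).rstrip()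
--     block += "\n\n" + end
--     return "".join(kept) + block + enums_src[j + len(end):]
-- ===== Notes on version B (the rewrite author's own statement) =====
-- stated objective: alternative
-- what changed: B is a single left-to-right character scan (an explicit state machine testing startswith at each position, copying the prefix char by char into an accumulator, then discarding up to the end marker) instead of A's membership guards plus two split/unpack passes, and it builds the commented block by string accumulation instead of a list comprehension joined with '\n'; where A raises ValueError (the only end marker precedes the begin marker) B conservatively returns the input unchanged.
import Mathlib
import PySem

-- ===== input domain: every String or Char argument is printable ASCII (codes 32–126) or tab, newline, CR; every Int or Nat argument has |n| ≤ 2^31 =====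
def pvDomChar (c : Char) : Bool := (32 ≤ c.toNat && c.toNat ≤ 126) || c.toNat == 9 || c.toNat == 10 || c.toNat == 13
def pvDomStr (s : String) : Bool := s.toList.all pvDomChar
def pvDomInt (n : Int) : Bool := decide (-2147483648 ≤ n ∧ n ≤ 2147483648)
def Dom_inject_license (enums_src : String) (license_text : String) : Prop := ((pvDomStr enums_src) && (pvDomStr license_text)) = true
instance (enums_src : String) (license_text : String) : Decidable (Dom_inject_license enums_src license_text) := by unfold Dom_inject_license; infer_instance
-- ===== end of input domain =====

-- B replaces A's membership guards + two split/unpack passes by one explicit character-by-character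
-- scan with an accumulator (a state machine: copy until the begin marker, discard until the end
-- marker) and builds the commented block by string accumulation instead of join over a list;
-- objective: alternative (same cost). Where A raises ValueError (excluded by Pre_), B returns the
-- input unchanged.

-- ===== PORT A =====
def inject_license (enums_src : String) (license_text : String) : String :=
  let bgn := "# MUMPS LICENSE"
  let fin := "# END MUMPS LICENSE"
  if !(PySem.Str.isIn bgn enums_src) || !(PySem.Str.isIn fin enums_src) then enums_src
  else
    -- 'pre, rest = enums_src.split(begin, 1)' — tuple unpacking ported as positional reads;
    -- on inputs where the second unpack has no element 1, Python raises ValueError (excluded by Pre_)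
    let parts1 := (PySem.Str.splitMax? enums_src bgn 1).getD []
    let pre := parts1.getD 0 ""
    let rest := parts1.getD 1 ""
    let parts2 := (PySem.Str.splitMax? rest fin 1).getD []
    let post := parts2.getD 1 ""
    pre ++ PySem.Str.join "\n"
      ([bgn] ++ (PySem.Str.splitlines license_text).map
          (fun ln => PySem.Str.rstrip ("# " ++ ln)) ++ ["", fin]) ++ post

-- ===== PORT B =====
-- the first while loop of Source B: copy characters into 'kept' until the marker starts here;
-- none = the loop ran off the end (i == n)
def pvScan (sub : List Char) : List Char → Option (List Char × List Char)
  | [] => none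
  | c :: t =>
    if sub.isPrefixOf (c :: t) then some ([], (c :: t).drop sub.length)
    else
      match pvScan sub t with
      | none => none
      | some (kept, rest) => some (c :: kept, rest)

-- the second while loop of Source B: advance (discarding) until the marker starts here
def pvSkip (sub : List Char) : List Char → Option (List Char)
  | [] => none
  | c :: t => if sub.isPrefixOf (c :: t) then some ((c :: t).drop sub.length) else pvSkip sub t

def inject_license_alt (enums_src : String) (license_text : String) : String :=
  let bgn := "# MUMPS LICENSE"
  let fin := "# END MUMPS LICENSE"
  match pvScan bgn.toList enums_src.toList with
  | none => enums_src
  | some (kept, rest) =>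
    match pvSkip fin.toList rest with
    | none => enums_src
    | some post =>
      let block := (PySem.Str.splitlines license_text).foldl
        (fun a ln => a ++ "\n" ++ PySem.Str.rstrip ("# " ++ ln)) bgn
      let block := block ++ "\n\n" ++ fin
      String.ofList kept ++ block ++ String.ofList post

-- ===== PRECONDITION & SPEC =====
-- Pre_ excludes exactly the inputs where both markers occur but no end marker occurs at or after the
-- first begin marker: there Python A raises ValueError (unpacking a 1-element split).
def Pre_inject_license (enums_src : String) (license_text : String) : Prop :=
  (PySem.Str.isIn "# MUMPS LICENSE" enums_src = true ∧
   PySem.Str.isIn "# END MUMPS LICENSE" enums_src = true) →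
  PySem.Str.findFrom enums_src "# END MUMPS LICENSE"
    (PySem.Str.find enums_src "# MUMPS LICENSE" + 15) none ≠ -1
instance (enums_src : String) (license_text : String) : Decidable (Pre_inject_license enums_src license_text) := by unfold Pre_inject_license; infer_instance
def pvWitness_inject_license : String × String := ("# MUMPS LICENSE# END MUMPS LICENSE", "x")

def Spec_inject_license (enums_src : String) (license_text : String) (out : String) : Prop := out = inject_license_alt enums_src license_text
instance (enums_src : String) (license_text : String) (out : String) : Decidable (Spec_inject_license enums_src license_text out) := by unfold Spec_inject_license; infer_instance

-- ===== CLAIM (what is proved, stated in full; the proofs are below) =====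
def Claim_equal_inject_license : Prop := ∀ (enums_src : String) (license_text : String), Dom_inject_license enums_src license_text → Pre_inject_license enums_src license_text → Spec_inject_license enums_src license_text (inject_license enums_src license_text)
-- ===== LEMMAS AND PROOFS =====

-- find.go at offset k is find at offset 0, shifted.
theorem pvFindGo_shift (sub : List Char) (hsub : sub ≠ []) :
    ∀ (t : List Char) (k : Nat),
      PySem.Chars.find.go sub t k =
        if PySem.Chars.find.go sub t 0 = -1 then -1
        else (k : Int) + PySem.Chars.find.go sub t 0 := by
  intro t
  induction t with
  | nil =>
    intro k
    simp [PySem.Chars.find.go, List.isEmpty_iff, hsub]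
  | cons c t ih =>
    intro k
    by_cases hp : sub.isPrefixOf (c :: t) = true
    · simp [PySem.Chars.find.go, hp]
    · simp only [PySem.Chars.find.go, hp, Bool.false_eq_true, if_false]
      rw [ih (k + 1), ih 1]
      by_cases h0 : PySem.Chars.find.go sub t 0 = -1
      · simp [h0]
      · simp only [h0, if_false]
        push_cast
        have hne : ¬ ((1 : Int) + PySem.Chars.find.go sub t 0 = -1) := by
          have h1 := PySem.Chars.neg_one_le_find (s := t) (sub := sub)
          simp only [PySem.Chars.find] at h1
          omega
        rw [if_neg hne]
        ring

theorem pvFind_of_prefix (sub l : List Char) (h : sub.isPrefixOf l = true) :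
    PySem.Chars.find l sub = 0 := by
  cases l with
  | nil =>
    have : sub = [] := by simpa [List.isPrefixOf_iff_prefix] using h
    simp [PySem.Chars.find, PySem.Chars.find.go, this]
  | cons c t =>
    simp [PySem.Chars.find, PySem.Chars.find.go, h]

theorem pvFind_cons (sub : List Char) (hsub : sub ≠ []) (c : Char) (t : List Char)
    (hp : sub.isPrefixOf (c :: t) = false) :
    PySem.Chars.find (c :: t) sub =
      if PySem.Chars.find t sub = -1 then -1 else 1 + PySem.Chars.find t sub := by
  simp only [PySem.Chars.find, PySem.Chars.find.go, hp, Bool.false_eq_true, if_false]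
  exact pvFindGo_shift sub hsub t 1

theorem pvIsIn_cons (sub : List Char) (c : Char) (t : List Char) :
    PySem.Chars.isIn sub (c :: t) = (sub.isPrefixOf (c :: t) || PySem.Chars.isIn sub t) := by
  by_cases hp : sub.isPrefixOf (c :: t) = true
  · have : PySem.Chars.isIn sub (c :: t) = true := by
      rw [PySem.Chars.isIn_iff_infix]
      exact (List.isPrefixOf_iff_prefix.mp hp).isInfix
    simp [this, hp]
  · have hp' : sub.isPrefixOf (c :: t) = false := by
      cases hpe : sub.isPrefixOf (c :: t) with
      | false => rfl
      | true => exact absurd hpe hp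
    simp only [hp', Bool.false_or]
    by_cases ht : PySem.Chars.isIn sub t = true
    · have : PySem.Chars.isIn sub (c :: t) = true := by
        rw [PySem.Chars.isIn_iff_infix] at ht ⊢
        exact List.infix_cons_iff.mpr (Or.inr ht)
      simp [this, ht]
    · have ht' : PySem.Chars.isIn sub t = false := by simpa using ht
      have : PySem.Chars.isIn sub (c :: t) = false := by
        rw [PySem.Chars.isIn_eq_false_iff, List.infix_cons_iff]
        rintro (hpre | hinf)
        · exact hp (List.isPrefixOf_iff_prefix.mpr hpre)
        · have ht2 := ht'
          rw [PySem.Chars.isIn_eq_false_iff] at ht2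
          exact ht2 hinf
      simp [this, ht']

theorem pvIsIn_nil (sub : List Char) (hsub : sub ≠ []) :
    PySem.Chars.isIn sub [] = false := by
  rw [PySem.Chars.isIn_eq_false_iff]
  intro h
  exact hsub (List.eq_nil_of_infix_nil h)

-- the first while loop of Source B, characterised by find: prefix before the first match, remainder after it
theorem pvScan_eq (sub : List Char) (hsub : sub ≠ []) :
    ∀ l : List Char, pvScan sub l =
      if PySem.Chars.isIn sub l = true then
        some (l.take (PySem.Chars.find l sub).toNat,
              l.drop ((PySem.Chars.find l sub).toNat + sub.length))
      else none := by
  intro l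
  induction l with
  | nil => simp [pvScan, pvIsIn_nil sub hsub]
  | cons c t ih =>
    by_cases hp : sub.isPrefixOf (c :: t) = true
    · have hfind : PySem.Chars.find (c :: t) sub = 0 := pvFind_of_prefix sub _ hp
      have hin : PySem.Chars.isIn sub (c :: t) = true := by
        rw [pvIsIn_cons sub, hp]; simp
      simp [pvScan, hp, hin, hfind]
    · have hp' : sub.isPrefixOf (c :: t) = false := by
        cases hpe : sub.isPrefixOf (c :: t) with
        | false => rfl
        | true => exact absurd hpe hp
      have hisin : PySem.Chars.isIn sub (c :: t) = PySem.Chars.isIn sub t := by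
        rw [pvIsIn_cons sub, hp']; simp
      by_cases hin : PySem.Chars.isIn sub t = true
      · have hne : PySem.Chars.find t sub ≠ -1 := by
          rw [PySem.Chars.find_ne_neg_one_iff]
          rw [PySem.Chars.isIn_iff_infix] at hin
          exact hin
        have hnn : 0 ≤ PySem.Chars.find t sub := by
          have := PySem.Chars.neg_one_le_find (s := t) (sub := sub)
          omega
        have hfc : PySem.Chars.find (c :: t) sub = 1 + PySem.Chars.find t sub := by
          rw [pvFind_cons sub hsub c t hp']
          simp [hne]
        have htn : (PySem.Chars.find (c :: t) sub).toNat =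
            (PySem.Chars.find t sub).toNat + 1 := by
          rw [hfc]; omega
        simp only [pvScan, hp', Bool.false_eq_true, if_false, ih, hin, if_true, hisin, htn]
        simp [List.take_succ_cons, List.drop_succ_cons, Nat.add_right_comm]
      · have hin' : PySem.Chars.isIn sub t = false := by simpa using hin
        simp [pvScan, hp', ih, hin', hisin]

-- the second while loop of Source B, characterised the same way
theorem pvSkip_eq (sub : List Char) (hsub : sub ≠ []) :
    ∀ l : List Char, pvSkip sub l =
      if PySem.Chars.isIn sub l = true then
        some (l.drop ((PySem.Chars.find l sub).toNat + sub.length))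
      else none := by
  intro l
  induction l with
  | nil => simp [pvSkip, pvIsIn_nil sub hsub]
  | cons c t ih =>
    by_cases hp : sub.isPrefixOf (c :: t) = true
    · have hfind : PySem.Chars.find (c :: t) sub = 0 := pvFind_of_prefix sub _ hp
      have hin : PySem.Chars.isIn sub (c :: t) = true := by
        rw [pvIsIn_cons sub, hp]; simp
      simp [pvSkip, hp, hin, hfind]
    · have hp' : sub.isPrefixOf (c :: t) = false := by
        cases hpe : sub.isPrefixOf (c :: t) with
        | false => rfl
        | true => exact absurd hpe hp
      have hisin : PySem.Chars.isIn sub (c :: t) = PySem.Chars.isIn sub t := by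
        rw [pvIsIn_cons sub, hp']; simp
      by_cases hin : PySem.Chars.isIn sub t = true
      · have hne : PySem.Chars.find t sub ≠ -1 := by
          rw [PySem.Chars.find_ne_neg_one_iff]
          rw [PySem.Chars.isIn_iff_infix] at hin
          exact hin
        have hfc : PySem.Chars.find (c :: t) sub = 1 + PySem.Chars.find t sub := by
          rw [pvFind_cons sub hsub c t hp']
          simp [hne]
        have hnn : 0 ≤ PySem.Chars.find t sub := by
          have := PySem.Chars.neg_one_le_find (s := t) (sub := sub)
          omega
        have htn : (PySem.Chars.find (c :: t) sub).toNat =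
            (PySem.Chars.find t sub).toNat + 1 := by
          rw [hfc]; omega
        simp only [pvSkip, hp', Bool.false_eq_true, if_false, ih, hin, if_true, hisin, htn]
        simp [List.drop_succ_cons, Nat.add_right_comm]
      · have hin' : PySem.Chars.isIn sub t = false := by simpa using hin
        simp [pvSkip, hp', ih, hin', hisin]

-- splitOnMax.go with maxsplit exhausted returns the remainder as the last piece.
theorem pvGo_zero (sep : List Char) (fuel : Nat) (l cur : List Char) (acc : List (List Char)) :
    PySem.Chars.splitOnMax.go sep fuel 0 l cur acc = ((cur.reverse ++ l) :: acc).reverse := by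
  cases fuel with
  | zero => simp [PySem.Chars.splitOnMax.go]
  | succ f =>
    cases l with
    | nil => simp [PySem.Chars.splitOnMax.go]
    | cons c t => simp [PySem.Chars.splitOnMax.go]

-- splitOnMax.go with maxsplit = 1: cut at the first occurrence of sep, if any.
theorem pvGo_one (sep : List Char) (hsub : sep ≠ []) :
    ∀ (l : List Char) (fuel : Nat) (cur : List Char) (acc : List (List Char)),
      l.length < fuel →
      PySem.Chars.splitOnMax.go sep fuel 1 l cur acc =
        if PySem.Chars.isIn sep l = true then
          acc.reverse ++ [cur.reverse ++ l.take (PySem.Chars.find l sep).toNat,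
                          l.drop ((PySem.Chars.find l sep).toNat + sep.length)]
        else acc.reverse ++ [cur.reverse ++ l] := by
  intro l
  induction l with
  | nil =>
    intro fuel cur acc hf
    cases fuel with
    | zero => omega
    | succ f =>
      simp [PySem.Chars.splitOnMax.go, pvIsIn_nil sep hsub]
  | cons c t ih =>
    intro fuel cur acc hf
    cases fuel with
    | zero => omega
    | succ f =>
      by_cases hp : sep.isPrefixOf (c :: t) = true
      · have hfind : PySem.Chars.find (c :: t) sep = 0 := pvFind_of_prefix sep _ hp
        have hin : PySem.Chars.isIn sep (c :: t) = true := by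
          rw [pvIsIn_cons sep, hp]; simp
        simp only [PySem.Chars.splitOnMax.go, hp, if_true, one_ne_zero, if_false]
        rw [pvGo_zero]
        simp [hin, hfind]
      · have hp' : sep.isPrefixOf (c :: t) = false := by
          cases hpe : sep.isPrefixOf (c :: t) with
          | false => rfl
          | true => exact absurd hpe hp
        simp only [PySem.Chars.splitOnMax.go, hp', Bool.false_eq_true, if_false, one_ne_zero]
        have ht : t.length < f := by simpa using Nat.lt_of_succ_lt_succ hf
        rw [ih f (c :: cur) acc ht]
        rw [pvIsIn_cons sep c t, hp']
        simp only [Bool.false_or]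
        by_cases hin : PySem.Chars.isIn sep t = true
        · have hne : PySem.Chars.find t sep ≠ -1 := by
            have hin2 := hin
            rw [PySem.Chars.isIn_iff_infix] at hin2
            rw [PySem.Chars.find_ne_neg_one_iff]
            exact hin2
          have hnn : 0 ≤ PySem.Chars.find t sep := by
            have := PySem.Chars.neg_one_le_find (s := t) (sub := sep)
            omega
          have hfc : PySem.Chars.find (c :: t) sep = 1 + PySem.Chars.find t sep := by
            rw [pvFind_cons sep hsub c t hp']
            simp [hne]
          have htn : (PySem.Chars.find (c :: t) sep).toNat =
              (PySem.Chars.find t sep).toNat + 1 := by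
            rw [hfc]; omega
          simp only [hin, if_true, htn]
          simp [List.take_succ_cons, List.drop_succ_cons, Nat.add_right_comm]
        · have hin' : PySem.Chars.isIn sep t = false := by simpa using hin
          simp [hin']

-- split(s, sep, 1) with sep present: [before first sep, after first sep].
theorem pvSplitOnMax_found (s sep : List Char) (hsep : sep ≠ [])
    (h : PySem.Chars.isIn sep s = true) :
    PySem.Chars.splitOnMax s sep 1 =
      [s.take (PySem.Chars.find s sep).toNat,
       s.drop ((PySem.Chars.find s sep).toNat + sep.length)] := by
  unfold PySem.Chars.splitOnMax
  norm_num
  rw [pvGo_one sep hsep s (s.length + 1) [] [] (by omega)]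
  simp [h]

theorem pvSplitMax?_found (s sep : String) (hsep : sep.toList ≠ [])
    (h : PySem.Str.isIn sep s = true) :
    PySem.Str.splitMax? s sep 1 =
      some [String.ofList (s.toList.take (PySem.Chars.find s.toList sep.toList).toNat),
            String.ofList (s.toList.drop
              ((PySem.Chars.find s.toList sep.toList).toNat + sep.toList.length))] := by
  have hin : PySem.Chars.isIn sep.toList s.toList = true := by
    simpa [PySem.Str.isIn] using h
  unfold PySem.Str.splitMax? PySem.Chars.splitMax?
  rw [if_neg (by simpa [List.isEmpty_iff] using hsep)]
  rw [pvSplitOnMax_found s.toList sep.toList hsep hin]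
  rfl

-- pulling a left concat through the join-shaped foldl
theorem pvFoldl_pull (sep : List Char) :
    ∀ (ls : List (List Char)) (a x : List Char),
      a ++ ls.foldl (fun p q => p ++ sep ++ q) x =
        ls.foldl (fun p q => p ++ sep ++ q) (a ++ x) := by
  intro ls
  induction ls with
  | nil => simp
  | cons y ls ih =>
    intro a x
    simp only [List.foldl_cons]
    rw [ih a (x ++ sep ++ y)]
    simp [List.append_assoc]

-- '\n'.join(b :: ls) as the foldl Source B computes
theorem pvJoin_foldl (sep : List Char) :
    ∀ (ls : List (List Char)) (b : List Char),
      PySem.Chars.join sep (b :: ls) = ls.foldl (fun p q => p ++ sep ++ q) b := by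
  intro ls
  induction ls with
  | nil => intro b; simp [PySem.Chars.join_singleton]
  | cons x ls ih =>
    intro b
    rw [PySem.Chars.join_cons_cons, ih x]
    simp only [List.foldl_cons]
    rw [pvFoldl_pull sep ls (b ++ sep) x]

-- the String-level foldl of Source B, pushed down to lists of characters
theorem pvToList_foldl :
    ∀ (ls : List String) (b : String),
      (ls.foldl (fun a ln => a ++ "\n" ++ PySem.Str.rstrip ("# " ++ ln)) b).toList =
        (ls.map (fun ln => (PySem.Str.rstrip ("# " ++ ln)).toList)).foldl
          (fun p q => p ++ ("\n" : String).toList ++ q) b.toList := by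
  intro ls
  induction ls with
  | nil => intro b; simp
  | cons x ls ih =>
    intro b
    simp [List.foldl_cons, List.map_cons, ih, String.toList_append]

-- B's accumulated block equals A's '\n'.join of the assembled list
theorem pvBlock_eq (license_text : String) :
    ((PySem.Str.splitlines license_text).foldl
        (fun a ln => a ++ "\n" ++ PySem.Str.rstrip ("# " ++ ln)) "# MUMPS LICENSE")
      ++ "\n\n" ++ "# END MUMPS LICENSE" =
    PySem.Str.join "\n"
      (["# MUMPS LICENSE"] ++ (PySem.Str.splitlines license_text).map
          (fun ln => PySem.Str.rstrip ("# " ++ ln)) ++ ["", "# END MUMPS LICENSE"]) := by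
  rw [← String.toList_inj]
  simp only [String.toList_append, PySem.Str.toList_join, pvToList_foldl, List.map_append,
    List.map_cons, List.map_nil, List.map_map, List.cons_append, Function.comp_def]
  rw [pvJoin_foldl]
  rw [List.foldl_append]
  have h0 : ("" : String).toList = [] := by decide
  have h2 : ("\n\n" : String).toList = ("\n" : String).toList ++ ("\n" : String).toList := by decide
  simp [h0, h2, List.append_assoc]

-- ===== VERDICT (by name: the statement is the Claim_ definition above) =====
theorem inject_license_spec : Claim_equal_inject_license := by
  intro s lt _hdom hpre
  unfold Spec_inject_license
  by_cases hb : PySem.Str.isIn "# MUMPS LICENSE" s = true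
  · by_cases he : PySem.Str.isIn "# END MUMPS LICENSE" s = true
    · -- both markers present; Pre_ guarantees an end marker after the first begin marker
      have hinf : ("# MUMPS LICENSE" : String).toList <:+: s.toList := by
        rw [← PySem.Str.isIn_iff_infix]; exact hb
      have hfnn : 0 ≤ PySem.Chars.find s.toList ("# MUMPS LICENSE" : String).toList := by
        rw [← PySem.Str.find_eq, PySem.Str.find_nonneg_iff]; exact hinf
      obtain ⟨iN, hi⟩ : ∃ iN : Nat,
          PySem.Chars.find s.toList ("# MUMPS LICENSE" : String).toList = (iN : Int) :=
        ⟨_, (Int.toNat_of_nonneg hfnn).symm⟩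
      have hpref : ("# MUMPS LICENSE" : String).toList <+: s.toList.drop iN := by
        have h := (PySem.Chars.find_spec hfnn).1
        rwa [hi, Int.toNat_natCast] at h
      have hk : iN + 15 ≤ s.toList.length := by
        have h1 := hpref.length_le
        rw [List.length_drop] at h1
        have h2 : ("# MUMPS LICENSE" : String).toList.length = 15 := by decide
        omega
      have hFF := PySem.Chars.findFrom_natCast s.toList
        ("# END MUMPS LICENSE" : String).toList (iN + 15) hk
      have hj0 : PySem.Str.findFrom s "# END MUMPS LICENSE"
          (PySem.Str.find s "# MUMPS LICENSE" + 15) none ≠ -1 := hpre ⟨hb, he⟩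
      have hcast : ((iN : Int) + 15) = ((iN + 15 : Nat) : Int) := by push_cast; ring
      have hj1 : PySem.Chars.findFrom s.toList ("# END MUMPS LICENSE" : String).toList
          ((iN + 15 : Nat) : Int) none ≠ -1 := by
        rw [PySem.Str.findFrom_eq, PySem.Str.find_eq, hi, hcast] at hj0
        exact hj0
      have hmne : PySem.Chars.find (s.toList.drop (iN + 15))
          ("# END MUMPS LICENSE" : String).toList ≠ -1 := by
        intro hc
        exact hj1 (by rw [hFF, if_pos hc])
      have hmnn : 0 ≤ PySem.Chars.find (s.toList.drop (iN + 15))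
          ("# END MUMPS LICENSE" : String).toList := by
        have h1 := PySem.Chars.neg_one_le_find (s.toList.drop (iN + 15))
          ("# END MUMPS LICENSE" : String).toList
        omega
      obtain ⟨mN, hm⟩ : ∃ mN : Nat, PySem.Chars.find (s.toList.drop (iN + 15))
          ("# END MUMPS LICENSE" : String).toList = (mN : Int) :=
        ⟨_, (Int.toNat_of_nonneg hmnn).symm⟩
      have hsplit1 : PySem.Str.splitMax? s "# MUMPS LICENSE" 1 =
          some [String.ofList (s.toList.take iN), String.ofList (s.toList.drop (iN + 15))] := by
        have h := pvSplitMax?_found s "# MUMPS LICENSE" (by decide) hb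
        rw [hi, Int.toNat_natCast] at h
        have h2 : ("# MUMPS LICENSE" : String).toList.length = 15 := by decide
        rw [h2] at h
        exact h
      have hrestin : PySem.Str.isIn "# END MUMPS LICENSE"
          (String.ofList (s.toList.drop (iN + 15))) = true := by
        rw [PySem.Str.isIn_iff_infix]
        simp only [String.toList_ofList]
        rw [← PySem.Chars.find_ne_neg_one_iff]
        exact hmne
      have hsplit2 : PySem.Str.splitMax? (String.ofList (s.toList.drop (iN + 15)))
          "# END MUMPS LICENSE" 1 =
          some [String.ofList ((s.toList.drop (iN + 15)).take mN),
                String.ofList ((s.toList.drop (iN + 15)).drop (mN + 19))] := by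
        have h := pvSplitMax?_found (String.ofList (s.toList.drop (iN + 15)))
          "# END MUMPS LICENSE" (by decide) hrestin
        simp only [String.toList_ofList] at h
        rw [hm, Int.toNat_natCast] at h
        have h2 : ("# END MUMPS LICENSE" : String).toList.length = 19 := by decide
        rw [h2] at h
        exact h
      have hA : inject_license s lt =
          String.ofList (s.toList.take iN) ++
          PySem.Str.join "\n" (["# MUMPS LICENSE"] ++
            (PySem.Str.splitlines lt).map (fun ln => PySem.Str.rstrip ("# " ++ ln)) ++
            ["", "# END MUMPS LICENSE"]) ++
          String.ofList ((s.toList.drop (iN + 15)).drop (mN + 19)) := by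
        simp only [inject_license, hb, he, Bool.not_true, Bool.or_self, Bool.false_eq_true,
          if_false, hsplit1, hsplit2, Option.getD_some, List.getD_cons_zero, List.getD_cons_succ]
      -- B side: evaluate the two scans
      have hbC : PySem.Chars.isIn ("# MUMPS LICENSE" : String).toList s.toList = true := hb
      have hscan : pvScan ("# MUMPS LICENSE" : String).toList s.toList =
          some (s.toList.take iN, s.toList.drop (iN + 15)) := by
        rw [pvScan_eq _ (by decide) s.toList, if_pos hbC, hi, Int.toNat_natCast]
        have h2 : ("# MUMPS LICENSE" : String).toList.length = 15 := by decide
        rw [h2]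
      have heC : PySem.Chars.isIn ("# END MUMPS LICENSE" : String).toList
          (s.toList.drop (iN + 15)) = true := by
        rw [PySem.Chars.isIn_iff_infix, ← PySem.Chars.find_ne_neg_one_iff]
        exact hmne
      have hskip : pvSkip ("# END MUMPS LICENSE" : String).toList (s.toList.drop (iN + 15)) =
          some ((s.toList.drop (iN + 15)).drop (mN + 19)) := by
        rw [pvSkip_eq _ (by decide) _, if_pos heC, hm, Int.toNat_natCast]
        have h2 : ("# END MUMPS LICENSE" : String).toList.length = 19 := by decide
        rw [h2]
      rw [hA]
      simp only [inject_license_alt, hscan, hskip]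
      rw [← pvBlock_eq lt]
    · -- end marker absent: both return the input
      have he' : PySem.Str.isIn "# END MUMPS LICENSE" s = false := by
        cases hx : PySem.Str.isIn "# END MUMPS LICENSE" s with
        | false => rfl
        | true => exact absurd hx he
      have heC : PySem.Chars.isIn ("# END MUMPS LICENSE" : String).toList s.toList = false := he'
      -- in B: if the begin scan finds something, the end scan fails (a substring of s contains fin only if s does)
      simp only [inject_license, he', Bool.not_false, Bool.or_true, if_true]
      simp only [inject_license_alt]
      cases hsc : pvScan ("# MUMPS LICENSE" : String).toList s.toList with
      | none => rfl
      | some p =>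
        obtain ⟨kept, rest⟩ := p
        have hbC : PySem.Chars.isIn ("# MUMPS LICENSE" : String).toList s.toList = true := by
          by_contra hx
          have hx' : PySem.Chars.isIn ("# MUMPS LICENSE" : String).toList s.toList = false := by
            cases hxe : PySem.Chars.isIn ("# MUMPS LICENSE" : String).toList s.toList with
            | false => rfl
            | true => exact absurd hxe hx
          rw [pvScan_eq _ (by decide) s.toList, if_neg hx] at hsc
          simp at hsc
        have hsc2 := hsc
        rw [pvScan_eq _ (by decide) s.toList, if_pos hbC] at hsc2
        simp only [Option.some.injEq, Prod.mk.injEq] at hsc2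
        obtain ⟨hkept, hrest⟩ := hsc2
        subst hrest
        have hrestF : PySem.Chars.isIn ("# END MUMPS LICENSE" : String).toList
            (s.toList.drop ((PySem.Chars.find s.toList ("# MUMPS LICENSE" : String).toList).toNat +
              ("# MUMPS LICENSE" : String).toList.length)) = false := by
          rw [PySem.Chars.isIn_eq_false_iff]
          intro hinf
          rw [PySem.Chars.isIn_eq_false_iff] at heC
          exact heC (hinf.trans (List.drop_suffix _ _).isInfix)
        have hskipN : pvSkip ("# END MUMPS LICENSE" : String).toList
            (s.toList.drop ((PySem.Chars.find s.toList ("# MUMPS LICENSE" : String).toList).toNat +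
              ("# MUMPS LICENSE" : String).toList.length)) = none := by
          rw [pvSkip_eq _ (by decide) _, if_neg (by rw [hrestF]; decide)]
        simp at hskipN
        simp [hskipN]
  · -- begin marker absent: both return the input
    have hb' : PySem.Str.isIn "# MUMPS LICENSE" s = false := by
      cases hx : PySem.Str.isIn "# MUMPS LICENSE" s with
      | false => rfl
      | true => exact absurd hx hb
    have hbC : PySem.Chars.isIn ("# MUMPS LICENSE" : String).toList s.toList = false := hb'
    have hscan : pvScan ("# MUMPS LICENSE" : String).toList s.toList = none := by
      rw [pvScan_eq _ (by decide) s.toList, if_neg (by rw [hbC]; decide)]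
    simp only [inject_license, hb', Bool.not_false, Bool.true_or, if_true]
    simp only [inject_license_alt]
    rw [hscan]
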